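-- pv_equiv track=rewrite | github.com/inns21/problem-solving | 백준/Silver/4779. 칸토어 집합/칸토어 집합.py | cantor
-- ===== SOURCE A (Python) =====
-- def cantor(n, start, end):
--     if n == 0:
--         return ['-'] * (end - start)
--
--     length = end - start
--     third = length // 3
--     result = cantor(n - 1, start, start + third)
--     result += [' '] * third
--     result += cantor(n - 1, start + 2 * third, end)
--     return result
-- ===== SOURCE B (Python) =====
-- def cantor(n, start, end):
--     length = end - start
--     out = []
--     for i in range(length):
--         lev = n
--         ln = length
--         j = i
--         ch = '-'
--         while lev > 0:
--             third = ln // 3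
--             if j < third:
--                 ln = third
--             elif j < 2 * third:
--                 ch = ' '
--                 break
--             else:
--                 j -= 2 * third
--                 ln -= 2 * third
--             lev -= 1
--         out.append(ch)
--     return out
-- ===== Notes on version B (the rewrite author's own statement) =====
-- stated objective: alternative
-- what changed: Instead of recursively concatenating sublists (a tree of 2^n recursive calls), B classifies each output index independently by walking the floor-division thirds top-down, building the list in one pass with no recursion and no list concatenation.
-- intended difference: On calls with end < start (an empty range) and n >= 1 whose deficit is less than 3^n - 1, A's floor-division recursion can emit spurious dash cells for the empty range (e.g. cantor(1,0,-1) returns ['-']), while B returns the intended empty list. — e.g. on cantor(1, 0, -1): A returns ["-"], B returns []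
import Mathlib
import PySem

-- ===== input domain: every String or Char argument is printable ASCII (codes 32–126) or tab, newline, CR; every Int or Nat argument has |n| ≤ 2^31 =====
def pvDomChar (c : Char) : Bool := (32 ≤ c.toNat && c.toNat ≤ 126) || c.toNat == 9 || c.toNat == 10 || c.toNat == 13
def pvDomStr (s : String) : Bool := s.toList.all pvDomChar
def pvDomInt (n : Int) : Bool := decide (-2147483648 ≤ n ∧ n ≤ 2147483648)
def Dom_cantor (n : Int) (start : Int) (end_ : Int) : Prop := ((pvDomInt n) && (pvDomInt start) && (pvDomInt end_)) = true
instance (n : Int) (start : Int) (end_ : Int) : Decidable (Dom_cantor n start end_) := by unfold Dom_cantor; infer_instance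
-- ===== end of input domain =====

-- B classifies each output index independently by walking the floor-division thirds
-- top-down (no recursion tree, no list concatenation); objective: alternative algorithm.

-- ===== PORT A =====
-- A recurses on n (one level of subdivision per call); depth counter as Nat fuel = n.toNat
-- (Pre_ restricts to 0 ≤ n, where this is exactly A's recursion).
def cantorGo : Nat → Int → Int → List String
  | 0, start, end_ => List.replicate (end_ - start).toNat "-"
  | n + 1, start, end_ =>
    let length := end_ - start
    let third := PySem.Int.floordiv length 3
    cantorGo n start (start + third)
      ++ List.replicate third.toNat " "
      ++ cantorGo n (start + 2 * third) end_

def cantor (n : Int) (start : Int) (end_ : Int) : List String :=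
  cantorGo n.toNat start end_

-- ===== PORT B =====
-- B's inner while-loop: level counts down from n; stops at the middle third (space) or
-- when the level is exhausted (dash).
def classifyGo : Nat → Int → Int → String
  | 0, _, _ => "-"
  | lev + 1, ln, j =>
    let third := PySem.Int.floordiv ln 3
    if j < third then classifyGo lev third j
    else if j < 2 * third then " "
    else classifyGo lev (ln - 2 * third) (j - 2 * third)

def cantor_alt (n : Int) (start : Int) (end_ : Int) : List String :=
  (PySem.List.pyRange 0 (end_ - start) 1).map
    (fun i => classifyGo n.toNat (end_ - start) i)

-- ===== PRECONDITION & SPEC =====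
-- Pre_ excludes n < 0, where A recurses with no base case and raises RecursionError.
def Pre_cantor (n : Int) (start : Int) (end_ : Int) : Prop := 0 ≤ n
instance (n : Int) (start : Int) (end_ : Int) : Decidable (Pre_cantor n start end_) := by unfold Pre_cantor; infer_instance
def pvWitness_cantor : Int × Int × Int := (2, 0, 9)

-- On calls with end_ < start (an empty range) and n ≥ 1 whose deficit is below 3^n - 1,
-- A's floor-division recursion can emit spurious dash cells for the empty range
-- (e.g. cantor(1,0,-1) = ['-']), while B returns the intended empty list.
-- (min · 21 only caps the exponent computationally: on Dom, 3^21 already exceeds any possible start - end_.)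
def D_cantor (n : Int) (start : Int) (end_ : Int) : Prop :=
  end_ < start ∧ 1 ≤ n ∧ start - end_ + 2 ≤ (3:Int) ^ (min n.toNat 21)
instance (n : Int) (start : Int) (end_ : Int) : Decidable (D_cantor n start end_) := by unfold D_cantor; infer_instance

def Spec_cantor (n : Int) (start : Int) (end_ : Int) (out : List String) : Prop :=
  ¬ D_cantor n start end_ → out = cantor_alt n start end_
instance (n : Int) (start : Int) (end_ : Int) (out : List String) : Decidable (Spec_cantor n start end_ out) := by unfold Spec_cantor; infer_instance

def pvDiffWitness_cantor : Int × Int × Int := (1, 0, -1)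
def pvDiffWitnessOut_cantor : (List String) × (List String) := (["-"], [])

-- ===== CLAIM (what is proved, stated in full; the proofs are below) =====
def Claim_unchanged_cantor : Prop := ∀ (n : Int) (start : Int) (end_ : Int), Dom_cantor n start end_ → Pre_cantor n start end_ → Spec_cantor n start end_ (cantor n start end_)
def Claim_changed_cantor : Prop := Dom_cantor (pvDiffWitness_cantor.1) (pvDiffWitness_cantor.2.1) (pvDiffWitness_cantor.2.2) ∧ Pre_cantor (pvDiffWitness_cantor.1) (pvDiffWitness_cantor.2.1) (pvDiffWitness_cantor.2.2) ∧ D_cantor (pvDiffWitness_cantor.1) (pvDiffWitness_cantor.2.1) (pvDiffWitness_cantor.2.2) ∧ cantor (pvDiffWitness_cantor.1) (pvDiffWitness_cantor.2.1) (pvDiffWitness_cantor.2.2) = pvDiffWitnessOut_cantor.1 ∧ cantor_alt (pvDiffWitness_cantor.1) (pvDiffWitness_cantor.2.1) (pvDiffWitness_cantor.2.2) = pvDiffWitnessOut_cantor.2 ∧ pvDiffWitnessOut_cantor.1 ≠ pvDiffWitnessOut_cantor.2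

-- ===== LEMMAS AND PROOFS =====

lemma fd3 (a : Int) : PySem.Int.floordiv a 3 = a / 3 :=
  PySem.Int.floordiv_eq_ediv_of_pos (by norm_num)

-- When the (negative) length is at most 1 - 3^N, every recursive piece of A is empty.
lemma cantorGo_empty (N : Nat) : ∀ s e : Int, e - s ≤ 1 - 3 ^ N → cantorGo N s e = [] := by
  induction N with
  | zero =>
    intro s e h
    simp only [cantorGo, pow_zero] at *
    have hz : (e - s).toNat = 0 := by omega
    simp [hz]
  | succ N ih =>
    intro s e h
    have hk : (1:Int) ≤ 3 ^ N := one_le_pow₀ (by norm_num)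
    have h3 : (3:Int) ^ (N + 1) = 3 * 3 ^ N := by ring
    simp only [cantorGo, fd3]
    rw [ih s (s + (e - s) / 3) (by omega), ih (s + 2 * ((e - s) / 3)) e (by omega)]
    have hz : ((e - s) / 3).toNat = 0 := by omega
    simp [hz]

-- Main equivalence on nonnegative lengths: A's recursive concatenation agrees,
-- cell by cell, with B's per-index classification.
lemma cantorGo_eq (N : Nat) : ∀ s e : Int, 0 ≤ e - s →
    cantorGo N s e
      = List.map (fun k : Nat => classifyGo N (e - s) ((k : Int))) (List.range (e - s).toNat) := by
  induction N with
  | zero =>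
    intro s e _
    simp [cantorGo, classifyGo, List.map_const', List.length_range]
  | succ N ih =>
    intro s e hL
    have hfd : PySem.Int.floordiv (e - s) 3 = (e - s) / 3 := fd3 _
    set L : Int := e - s with hLdef
    set T : Int := L / 3 with hTdef
    have hT0 : 0 ≤ T := Int.ediv_nonneg hL (by norm_num)
    have hT3 : 3 * T ≤ L ∧ L < 3 * T + 3 := by omega
    have e1 : s + T - s = T := by ring
    have e2 : e - (s + 2 * T) = L - 2 * T := by omega
    have hcast : (T.toNat : Int) = T := Int.toNat_of_nonneg hT0
    have hsplit : L.toNat = T.toNat + (T.toNat + (L - 2 * T).toNat) := by omega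
    have h1 : List.map (fun k : Nat => classifyGo (N + 1) L ((k : Int))) (List.range T.toNat)
        = List.map (fun k : Nat => classifyGo N T ((k : Int))) (List.range T.toNat) := by
      apply List.map_congr_left
      intro k hk
      rw [List.mem_range] at hk
      have hkT : ((k : Int)) < T := by omega
      simp only [classifyGo, hfd, ← hTdef, if_pos hkT]
    have h2 : List.map (fun k : Nat => classifyGo (N + 1) L (((T.toNat + k : Nat) : Int))) (List.range T.toNat)
        = List.replicate T.toNat " " := by
      rw [show List.replicate T.toNat " " = List.map (fun _ : Nat => (" " : String)) (List.range T.toNat) from by simp [List.map_const']]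
      apply List.map_congr_left
      intro k hk
      rw [List.mem_range] at hk
      have hb1 : ¬ (((T.toNat + k : Nat) : Int) < T) := by omega
      have hb2 : ((T.toNat + k : Nat) : Int) < 2 * T := by omega
      simp only [classifyGo, hfd, ← hTdef, if_neg hb1, if_pos hb2]
    have h3 : List.map (fun k : Nat => classifyGo (N + 1) L (((T.toNat + (T.toNat + k) : Nat) : Int))) (List.range (L - 2 * T).toNat)
        = List.map (fun k : Nat => classifyGo N (L - 2 * T) ((k : Int))) (List.range (L - 2 * T).toNat) := by
      apply List.map_congr_left
      intro k hk
      rw [List.mem_range] at hk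
      have hb1 : ¬ (((T.toNat + (T.toNat + k) : Nat) : Int) < T) := by omega
      have hb2 : ¬ (((T.toNat + (T.toNat + k) : Nat) : Int) < 2 * T) := by omega
      simp only [classifyGo, hfd, ← hTdef, if_neg hb1, if_neg hb2]
      congr 1
      omega
    calc cantorGo (N + 1) s e
        = cantorGo N s (s + T) ++ List.replicate T.toNat " " ++ cantorGo N (s + 2 * T) e := by
          simp only [cantorGo, hfd, ← hLdef, ← hTdef]
      _ = List.map (fun k : Nat => classifyGo N T ((k : Int))) (List.range T.toNat)
            ++ List.replicate T.toNat " "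
            ++ List.map (fun k : Nat => classifyGo N (L - 2 * T) ((k : Int))) (List.range (L - 2 * T).toNat) := by
          rw [ih s (s + T) (by omega), ih (s + 2 * T) e (by omega), e1, e2]
      _ = List.map (fun k : Nat => classifyGo (N + 1) L ((k : Int))) (List.range L.toNat) := by
          rw [hsplit, List.range_add, List.range_add, List.map_append, List.map_append,
              List.map_append, List.map_map, List.map_map, List.map_map]
          simp only [Function.comp_def]
          rw [h1, h2, h3, List.append_assoc]

-- ===== VERDICT (by name: the statement is the Claim_ definition above) =====
theorem cantor_spec : Claim_unchanged_cantor := by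
  intro n s e hdom hpre hD
  have hb : -2147483648 ≤ s ∧ s ≤ 2147483648 ∧ -2147483648 ≤ e ∧ e ≤ 2147483648 := by
    simp only [Dom_cantor, pvDomInt, Bool.and_eq_true, decide_eq_true_eq] at hdom
    exact ⟨hdom.1.2.1, hdom.1.2.2, hdom.2.1, hdom.2.2⟩
  rw [cantor, cantor_alt, PySem.List.pyRange_one]
  by_cases hL : 0 ≤ e - s
  · rw [cantorGo_eq n.toNat s e hL, List.map_map]
    simp [Function.comp_def]
  · -- e < s: both sides are empty (hD rules out the spurious-dash region)
    have hz : (e - s - 0).toNat = 0 := by omega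
    rw [hz]
    simp only [List.range_zero, List.map_nil]
    rcases Nat.eq_zero_or_pos n.toNat with h0 | h1
    · rw [h0]
      simp only [cantorGo]
      have hz2 : (e - s).toNat = 0 := by omega
      simp [hz2]
    · -- n ≥ 1, length negative, outside D_: the deficit is at least 3^n - 1
      unfold Pre_cantor at hpre
      have hn : (n.toNat : Int) = n := Int.toNat_of_nonneg hpre
      have hbig : ¬ (s - e + 2 ≤ (3:Int) ^ (min n.toNat 21)) := fun hle => hD ⟨by omega, by omega, hle⟩
      by_cases hc : n.toNat ≤ 21
      · rw [min_eq_left hc] at hbig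
        exact cantorGo_empty n.toNat s e (by omega)
      · exfalso
        rw [min_eq_right (by omega)] at hbig
        have h21 : (3:Int) ^ (21:Nat) = 10460353203 := by norm_num
        omega

theorem cantor_changed : Claim_changed_cantor := by
  unfold Claim_changed_cantor; decide
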